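-- pv_equiv track=rewrite | github.com/barti19941/Python | Projekt/skeleton.py | checkClustersMatrix
-- ===== SOURCE A (Python) =====
-- def checkClustersMatrix(k,clusters):
--     tmp = 0;
--     for i in range(k):
--         for j in range(len(clusters)):
--             if clusters[j] == i:
--                 tmp = tmp+1;
--                 break;
--     return tmp;
-- ===== SOURCE B (Python) =====
-- def checkClustersMatrix(k, clusters):
--     found = []
--     for v in clusters:
--         if 0 <= v < k and v not in found:
--             found.append(v)
--     return len(found)
-- ===== Notes on version B (the rewrite author's own statement) =====
-- stated objective: faster
-- what changed: Single pass over clusters collecting distinct in-range values instead of scanning clusters once per value in range(k).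
import Mathlib
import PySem

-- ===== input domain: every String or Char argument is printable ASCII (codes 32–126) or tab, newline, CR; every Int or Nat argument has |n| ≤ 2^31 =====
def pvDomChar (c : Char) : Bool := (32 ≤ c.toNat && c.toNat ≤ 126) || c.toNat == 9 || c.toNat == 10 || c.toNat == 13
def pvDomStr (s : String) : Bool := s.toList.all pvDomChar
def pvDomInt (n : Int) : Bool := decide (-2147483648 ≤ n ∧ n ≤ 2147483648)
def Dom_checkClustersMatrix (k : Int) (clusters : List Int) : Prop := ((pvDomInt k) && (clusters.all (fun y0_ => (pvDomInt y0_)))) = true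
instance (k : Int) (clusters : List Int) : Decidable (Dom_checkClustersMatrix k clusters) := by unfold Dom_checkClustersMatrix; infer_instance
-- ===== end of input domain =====

-- B replaces A's scan of clusters once per value of range(k) by a single pass over
-- clusters that collects the distinct in-range values (objective: faster).

-- ===== PORT A =====
-- inner 'for j in range(len(clusters)): if clusters[j] == i: tmp += 1; break'
def pvInnerA (i : Int) : List Int → Int → Int
  | [], tmp => tmp
  | c :: rest, tmp => if c = i then tmp + 1 else pvInnerA i rest tmp

def checkClustersMatrix (k : Int) (clusters : List Int) : Int :=
  (PySem.List.pyRange 0 k 1).foldl (fun tmp i => pvInnerA i clusters tmp) 0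

-- ===== PORT B =====
def checkClustersMatrix_alt (k : Int) (clusters : List Int) : Int :=
  (clusters.foldl
    (fun found v => if 0 ≤ v ∧ v < k ∧ v ∉ found then found ++ [v] else found)
    ([] : List Int)).length

-- ===== PRECONDITION & SPEC =====
def Spec_checkClustersMatrix (k : Int) (clusters : List Int) (out : Int) : Prop := out = checkClustersMatrix_alt k clusters
instance (k : Int) (clusters : List Int) (out : Int) : Decidable (Spec_checkClustersMatrix k clusters out) := by unfold Spec_checkClustersMatrix; infer_instance

-- ===== CLAIM (what is proved, stated in full; the proofs are below) =====
def Claim_equal_checkClustersMatrix : Prop := ∀ (k : Int) (clusters : List Int), Dom_checkClustersMatrix k clusters → Spec_checkClustersMatrix k clusters (checkClustersMatrix k clusters)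

-- ===== LEMMAS AND PROOFS =====

theorem pvInnerA_eq (i : Int) (cs : List Int) (tmp : Int) :
    pvInnerA i cs tmp = if i ∈ cs then tmp + 1 else tmp := by
  induction cs with
  | nil => simp [pvInnerA]
  | cons c rest ih =>
    simp only [pvInnerA, List.mem_cons]
    by_cases h : c = i
    · simp [h]
    · have : ¬ i = c := fun hh => h hh.symm
      simp [h, this, ih]

theorem foldA_count (cs : List Int) (l : List Int) (tmp : Int) :
    l.foldl (fun tmp i => pvInnerA i cs tmp) tmp
      = tmp + ((l.filter (fun i => decide (i ∈ cs))).length : Int) := by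
  induction l generalizing tmp with
  | nil => simp
  | cons a rest ih =>
    rw [List.foldl_cons, pvInnerA_eq, List.filter_cons]
    by_cases h : a ∈ cs
    · rw [if_pos h, if_pos (by simp [h]), ih, List.length_cons]
      push_cast; ring
    · rw [if_neg h, if_neg (by simp [h]), ih]

theorem foldB_inv (k : Int) (xs : List Int) :
    ∀ found : List Int, found.Nodup →
      (xs.foldl (fun found v => if 0 ≤ v ∧ v < k ∧ v ∉ found then found ++ [v] else found) found).Nodup ∧
      (xs.foldl (fun found v => if 0 ≤ v ∧ v < k ∧ v ∉ found then found ++ [v] else found) found).toFinset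
        = found.toFinset ∪ (xs.filter (fun v => decide (0 ≤ v ∧ v < k))).toFinset := by
  induction xs with
  | nil => intro found h; simp [h]
  | cons a rest ih =>
    intro found hnd
    rw [List.foldl_cons, List.filter_cons]
    by_cases hcond : 0 ≤ a ∧ a < k
    · have hdt : decide (0 ≤ a ∧ a < k) = true := by simp [hcond]
      rw [if_pos hdt]
      by_cases hmem : a ∈ found
      · rw [if_neg (show ¬(0 ≤ a ∧ a < k ∧ a ∉ found) by tauto)]
        obtain ⟨h1, h2⟩ := ih found hnd
        refine ⟨h1, h2.trans ?_⟩
        ext x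
        simp only [List.mem_toFinset, Finset.mem_union, List.mem_filter, List.mem_cons,
          decide_eq_true_eq]
        constructor
        · rintro (hx | ⟨hx, hr⟩)
          · exact Or.inl hx
          · exact Or.inr (Or.inr ⟨hx, hr⟩)
        · rintro (hx | hx | ⟨hx, hr⟩)
          · exact Or.inl hx
          · exact Or.inl (hx ▸ hmem)
          · exact Or.inr ⟨hx, hr⟩
      · rw [if_pos (show 0 ≤ a ∧ a < k ∧ a ∉ found from ⟨hcond.1, hcond.2, hmem⟩)]
        have hnd' : (found ++ [a]).Nodup := by
          rw [List.nodup_append]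
          refine ⟨hnd, List.nodup_singleton a, ?_⟩
          intro b hb c hc
          have hc' : c = a := List.mem_singleton.mp hc
          subst hc'
          intro he
          exact hmem (he ▸ hb)
        obtain ⟨h1, h2⟩ := ih (found ++ [a]) hnd'
        refine ⟨h1, h2.trans ?_⟩
        ext x
        simp only [List.toFinset_append, Finset.mem_union, List.mem_toFinset, List.mem_filter,
          List.mem_cons, List.mem_singleton, List.not_mem_nil, or_false, decide_eq_true_eq]
        constructor
        · rintro ((hx | hx) | ⟨hx, hr⟩)
          · exact Or.inl hx
          · exact Or.inr (Or.inl (by aesop))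
          · exact Or.inr (Or.inr ⟨hx, hr⟩)
        · rintro (hx | hx | ⟨hx, hr⟩)
          · exact Or.inl (Or.inl hx)
          · exact Or.inl (Or.inr hx)
          · exact Or.inr ⟨hx, hr⟩
    · have hdf : ¬(decide (0 ≤ a ∧ a < k) = true) := by simp [hcond]
      rw [if_neg hdf, if_neg (show ¬(0 ≤ a ∧ a < k ∧ a ∉ found) by tauto)]
      exact ih found hnd

theorem finsets_eq (k : Int) (clusters : List Int) :
    ((PySem.List.pyRange 0 k 1).filter (fun i => decide (i ∈ clusters))).toFinset
      = (clusters.filter (fun v => decide (0 ≤ v ∧ v < k))).toFinset := by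
  ext x
  simp [List.mem_toFinset, List.mem_filter, PySem.List.mem_pyRange_one]
  tauto

-- ===== VERDICT (by name: the statement is the Claim_ definition above) =====
theorem checkClustersMatrix_spec : Claim_equal_checkClustersMatrix := by
  intro k clusters _
  show checkClustersMatrix k clusters = checkClustersMatrix_alt k clusters
  unfold checkClustersMatrix checkClustersMatrix_alt
  rw [foldA_count]
  obtain ⟨hnd, hts⟩ := foldB_inv k clusters [] List.nodup_nil
  have hA : ((PySem.List.pyRange 0 k 1).filter (fun i => decide (i ∈ clusters))).Nodup :=
    (PySem.List.nodup_pyRange_one 0 k).filter _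
  have key : ((PySem.List.pyRange 0 k 1).filter (fun i => decide (i ∈ clusters))).length
      = (clusters.foldl
          (fun found v => if 0 ≤ v ∧ v < k ∧ v ∉ found then found ++ [v] else found)
          ([] : List Int)).length := by
    calc ((PySem.List.pyRange 0 k 1).filter (fun i => decide (i ∈ clusters))).length
        = ((PySem.List.pyRange 0 k 1).filter (fun i => decide (i ∈ clusters))).toFinset.card :=
          (List.toFinset_card_of_nodup hA).symm
      _ = (clusters.filter (fun v => decide (0 ≤ v ∧ v < k))).toFinset.card := by
          rw [finsets_eq]
      _ = (clusters.foldl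
            (fun found v => if 0 ≤ v ∧ v < k ∧ v ∉ found then found ++ [v] else found)
            ([] : List Int)).toFinset.card := by rw [hts]; simp
      _ = _ := List.toFinset_card_of_nodup hnd
  rw [key]; omega
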